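-- pv_equiv track=rewrite | github.com/pranjul2206/STAKEFISH | SCRAPER/Scraper_stakefish.py | PrepareCount
-- ===== SOURCE A (Python) =====
-- def PrepareCount(ScrapedAData,prevTimeStamp,count):
--     for index,value in enumerate(ScrapedAData):
--         currentTimeStamp=value[2]
--         if (currentTimeStamp-prevTimeStamp)/3600 >2:
--             count+=1
--         ScrapedAData[index].append(count)
--         prevTimeStamp=currentTimeStamp
--     return ScrapedAData
-- ===== SOURCE B (Python) =====
-- def PrepareCount(ScrapedAData, prevTimeStamp, count):
--     # phase 1: read timestamps and build 0/1 increment flags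
--     ts = [row[2] for row in ScrapedAData]
--     flags = [1 if (cur - prev) / 3600 > 2 else 0
--              for cur, prev in zip(ts, [prevTimeStamp] + ts)]
--     # phase 2: running counts = prefix sums of the flags seeded by count
--     counts = []
--     for f in flags:
--         count += f
--         counts.append(count)
--     # phase 3: mutate the same sublist objects in place
--     for row, c in zip(ScrapedAData, counts):
--         row.append(c)
--     return ScrapedAData
-- ===== Notes on version B (the rewrite author's own statement) =====
-- stated objective: alternative
-- what changed: The fused loop is split into three phases: extract timestamps and build 0/1 gap flags against the shifted timestamp list, turn them into running counts by a prefix sum, then append each count to its sublist.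
import Mathlib
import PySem

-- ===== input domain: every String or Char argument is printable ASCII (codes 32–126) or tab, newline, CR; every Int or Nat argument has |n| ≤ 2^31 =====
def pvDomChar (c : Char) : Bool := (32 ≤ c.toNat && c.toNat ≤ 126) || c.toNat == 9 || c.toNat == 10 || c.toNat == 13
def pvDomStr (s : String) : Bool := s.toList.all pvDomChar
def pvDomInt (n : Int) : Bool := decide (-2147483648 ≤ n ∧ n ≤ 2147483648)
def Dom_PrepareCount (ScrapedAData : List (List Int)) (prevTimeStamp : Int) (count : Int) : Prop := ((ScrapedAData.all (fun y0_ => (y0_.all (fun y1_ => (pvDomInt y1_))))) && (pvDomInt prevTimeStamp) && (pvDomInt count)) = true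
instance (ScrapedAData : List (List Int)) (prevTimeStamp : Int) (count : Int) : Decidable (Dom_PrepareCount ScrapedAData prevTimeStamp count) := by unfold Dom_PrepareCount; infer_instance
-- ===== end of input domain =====

-- B restructures A's single fused loop into three phases (flag list, prefix sums, in-place append);
-- equivalence is about the return value (both Pythons also mutate the argument's sublists identically).


-- ===== PORT A =====
-- Python's float test (cur-prev)/3600 > 2 is exactly cur-prev > 7200 for the |int| ≤ 2^31 domain
-- (the difference is an exact double and no integer quotient rounds onto 2.0); both ports use it.
def goA : List (List Int) → Int → Int → List (List Int)
  | [], _, _ => []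
  | v :: rest, prev, count =>
    let cur := (PySem.List.pyGet? v 2).getD 0   -- value[2]; Pre_ guarantees the index is in range
    let count' := if cur - prev > 7200 then count + 1 else count
    (v ++ [count']) :: goA rest cur count'

def PrepareCount (ScrapedAData : List (List Int)) (prevTimeStamp : Int) (count : Int) : List (List Int) :=
  goA ScrapedAData prevTimeStamp count

-- ===== PORT B =====
def PrepareCount_alt (ScrapedAData : List (List Int)) (prevTimeStamp : Int) (count : Int) : List (List Int) :=
  let ts := ScrapedAData.map (fun row => (PySem.List.pyGet? row 2).getD 0)
  let flags := (ts.zip (prevTimeStamp :: ts)).map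
      (fun p => if p.1 - p.2 > 7200 then (1 : Int) else 0)
  let counts := (flags.scanl (· + ·) count).tail   -- prefix sums seeded by count, initial seed dropped
  (ScrapedAData.zip counts).map (fun p => p.1 ++ [p.2])

-- ===== PRECONDITION & SPEC =====
-- Pre_ excludes exactly the inputs where A raises IndexError: some row has fewer than 3 elements.
def Pre_PrepareCount (ScrapedAData : List (List Int)) (prevTimeStamp : Int) (count : Int) : Prop :=
  ∀ row ∈ ScrapedAData, 3 ≤ row.length
instance (ScrapedAData : List (List Int)) (prevTimeStamp : Int) (count : Int) : Decidable (Pre_PrepareCount ScrapedAData prevTimeStamp count) := by unfold Pre_PrepareCount; infer_instance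
def pvWitness_PrepareCount : List (List Int) × Int × Int := ([[1, 2, 9000], [3, 4, 9100]], 0, 5)

def Spec_PrepareCount (ScrapedAData : List (List Int)) (prevTimeStamp : Int) (count : Int) (out : List (List Int)) : Prop := out = PrepareCount_alt ScrapedAData prevTimeStamp count
instance (ScrapedAData : List (List Int)) (prevTimeStamp : Int) (count : Int) (out : List (List Int)) : Decidable (Spec_PrepareCount ScrapedAData prevTimeStamp count out) := by unfold Spec_PrepareCount; infer_instance

-- ===== CLAIM (what is proved, stated in full; the proofs are below) =====
def Claim_equal_PrepareCount : Prop := ∀ (ScrapedAData : List (List Int)) (prevTimeStamp : Int) (count : Int), Dom_PrepareCount ScrapedAData prevTimeStamp count → Pre_PrepareCount ScrapedAData prevTimeStamp count → Spec_PrepareCount ScrapedAData prevTimeStamp count (PrepareCount ScrapedAData prevTimeStamp count)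

-- ===== LEMMAS AND PROOFS =====
-- A's fused loop equals B's three-phase pipeline, for every seed (no Pre_/Dom needed: both
-- ports read value[2] through the same total getter).
-- zip against a scanl: the head pairs with the seed, the tail recurses (shape fact for phase 2/3)
theorem zip_scanl_cons {α : Type} (g : Int → Int → Int) (c : Int) (x : α) (xs : List α) (l : List Int) :
    (x :: xs).zip (List.scanl g c l) = (x, c) :: xs.zip ((List.scanl g c l).tail) := by
  cases l <;> simp [List.scanl_cons]

-- A's fused loop equals B's three-phase pipeline, for every seed (no Pre_/Dom needed: both
-- ports read value[2] through the same total getter).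
theorem goA_eq_alt (xs : List (List Int)) : ∀ (prev count : Int),
    goA xs prev count = PrepareCount_alt xs prev count := by
  induction xs with
  | nil => intro prev count; rfl
  | cons v rest ih =>
    intro prev count
    have hc : count + (if (PySem.List.pyGet? v 2).getD 0 - prev > 7200 then (1 : Int) else 0)
        = if (PySem.List.pyGet? v 2).getD 0 - prev > 7200 then count + 1 else count := by
      split_ifs <;> ring
    simp only [goA, PrepareCount_alt, List.map_cons, List.zip_cons_cons, List.scanl_cons,
      List.tail_cons]
    rw [hc, zip_scanl_cons, List.map_cons, ih]
    simp only [PrepareCount_alt]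

-- ===== VERDICT (by name: the statement is the Claim_ definition above) =====
theorem PrepareCount_spec : Claim_equal_PrepareCount := by
  intro xs prev count _ _
  unfold Spec_PrepareCount PrepareCount
  exact goA_eq_alt xs prev count
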